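-- pv_equiv track=rewrite | github.com/zhangdailin/NVIDIA_NETWORK_HEALTH_CHECK_PLATFORM | backend/services/xmit_service.py | _decode_speed
-- ===== SOURCE A (Python) =====
-- from typing import Dict, List, Optional, Tuple
--
-- SPEED_PRIORITY = [
--     (0x800, ("HDR/NDR", 7)),
--     (0x400, ("EDR/HDR100", 6)),
--     (0x200, ("FDR10", 5)),
--     (0x100, ("FDR", 4)),
--     (0x80, ("QDR", 3)),
--     (0x40, ("DDR", 2)),
--     (0x20, ("SDR+", 1)),
--     (0x10, ("SDR", 1)),
--     (0x8, ("Legacy", 0)),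
--     (0x4, ("Legacy", 0)),
--     (0x2, ("Legacy", 0)),
--     (0x1, ("Legacy", 0)),
-- ]
--
-- def _decode_speed(value) -> Tuple[Optional[int], Optional[str]]:
--     try:
--         code = int(value)
--     except (TypeError, ValueError):
--         return (None, None)
--     for bit, (label, priority) in SPEED_PRIORITY:
--         if code & bit:
--             return (priority, label)
--     return (None, None)
-- ===== SOURCE B (Python) =====
-- from typing import Optional, Tuple
--
-- # (priority, label) indexed by bit position 0..11 of the highest set speed bit.
-- _SPEED_BY_POS = [
--     (0, "Legacy"), (0, "Legacy"), (0, "Legacy"), (0, "Legacy"),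
--     (1, "SDR"), (1, "SDR+"), (2, "DDR"), (3, "QDR"),
--     (4, "FDR"), (5, "FDR10"), (6, "EDR/HDR100"), (7, "HDR/NDR"),
-- ]
--
-- def _decode_speed(value) -> Tuple[Optional[int], Optional[str]]:
--     try:
--         code = int(value)
--     except (TypeError, ValueError):
--         return (None, None)
--     m = code % 4096          # same as masking to the 12 speed bits
--     if m == 0:
--         return (None, None)
--     priority, label = _SPEED_BY_POS[m.bit_length() - 1]
--     return (priority, label)
-- ===== Notes on version B (the rewrite author's own statement) =====
-- stated objective: alternative
-- what changed: Replaces A's linear first-match scan over the (bit, label) pairs by masking to the low twelve bits and using bit_length() to index a precomputed per-bit-position table by the position of the highest set bit.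
import Mathlib
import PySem

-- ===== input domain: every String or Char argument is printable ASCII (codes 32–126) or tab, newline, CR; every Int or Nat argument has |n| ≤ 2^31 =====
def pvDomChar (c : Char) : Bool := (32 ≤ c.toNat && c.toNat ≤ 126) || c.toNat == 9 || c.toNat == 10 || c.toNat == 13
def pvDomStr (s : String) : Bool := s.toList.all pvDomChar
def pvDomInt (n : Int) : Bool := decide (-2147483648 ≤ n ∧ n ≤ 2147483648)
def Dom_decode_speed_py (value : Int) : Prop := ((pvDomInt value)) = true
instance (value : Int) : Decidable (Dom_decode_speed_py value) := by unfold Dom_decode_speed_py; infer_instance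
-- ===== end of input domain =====

-- B replaces A's linear scan over the speed bits by one MSB (bit_length) computation and a table lookup; same result (objective: alternative).

-- ===== PORT A =====
def SPEED_PRIORITY : List (Int × (String × Int)) :=
  [(2048, ("HDR/NDR", 7)), (1024, ("EDR/HDR100", 6)), (512, ("FDR10", 5)), (256, ("FDR", 4)),
   (128, ("QDR", 3)), (64, ("DDR", 2)), (32, ("SDR+", 1)), (16, ("SDR", 1)),
   (8, ("Legacy", 0)), (4, ("Legacy", 0)), (2, ("Legacy", 0)), (1, ("Legacy", 0))]

-- the 'for bit, (label, priority) in SPEED_PRIORITY' loop; int(value) on an int is the identity and never raises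
def scanSpeed (code : Int) : List (Int × (String × Int)) → Option Int × Option String
  | [] => (none, none)
  | (bit, (label, priority)) :: rest =>
      if PySem.Int.band code bit ≠ 0 then (some priority, some label) else scanSpeed code rest

def decode_speed_py (value : Int) : Option Int × Option String :=
  scanSpeed value SPEED_PRIORITY

-- ===== PORT B =====
def SPEED_BY_POS : List (Int × String) :=
  [(0, "Legacy"), (0, "Legacy"), (0, "Legacy"), (0, "Legacy"),
   (1, "SDR"), (1, "SDR+"), (2, "DDR"), (3, "QDR"),
   (4, "FDR"), (5, "FDR10"), (6, "EDR/HDR100"), (7, "HDR/NDR")]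

def decode_speed_py_alt (value : Int) : Option Int × Option String :=
  let m := PySem.Int.mod value 4096
  if m = 0 then (none, none)
  else
    -- list index is always in range (1 ≤ bit_length m ≤ 12), so plain indexing never raises
    let e := SPEED_BY_POS.getD (PySem.Int.bitLength m - 1) (0, "")
    (some e.1, some e.2)

-- ===== PRECONDITION & SPEC =====
def Spec_decode_speed_py (value : Int) (out : Option Int × Option String) : Prop := out = decode_speed_py_alt value
instance (value : Int) (out : Option Int × Option String) : Decidable (Spec_decode_speed_py value out) := by unfold Spec_decode_speed_py; infer_instance

-- ===== CLAIM (what is proved, stated in full; the proofs are below) =====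
def Claim_equal_decode_speed_py : Prop := ∀ (value : Int), Dom_decode_speed_py value → Spec_decode_speed_py value (decode_speed_py value)

-- ===== LEMMAS AND PROOFS =====

-- A's answer as a function of the 12 low bits of the input
def aCore (r : Nat) : Option Int × Option String :=
  if r.testBit 11 then (some 7, some "HDR/NDR")
  else if r.testBit 10 then (some 6, some "EDR/HDR100")
  else if r.testBit 9 then (some 5, some "FDR10")
  else if r.testBit 8 then (some 4, some "FDR")
  else if r.testBit 7 then (some 3, some "QDR")
  else if r.testBit 6 then (some 2, some "DDR")
  else if r.testBit 5 then (some 1, some "SDR+")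
  else if r.testBit 4 then (some 1, some "SDR")
  else if r.testBit 3 then (some 0, some "Legacy")
  else if r.testBit 2 then (some 0, some "Legacy")
  else if r.testBit 1 then (some 0, some "Legacy")
  else if r.testBit 0 then (some 0, some "Legacy")
  else (none, none)

-- B's answer as a function of the 12 low bits of the input
def bCore (r : Nat) : Option Int × Option String :=
  if r = 0 then (none, none)
  else
    let e := SPEED_BY_POS.getD (PySem.Int.bitLength (r : Int) - 1) (0, "")
    (some e.1, some e.2)

-- complement inside 12 bits flips every tested bit
theorem testBit_compl12 (x : Nat) (hx : x < 4096) (k : Nat) (hk : k < 12) :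
    (4095 - x).testBit k = !x.testBit k := by
  have h : (4095 - x) = 2 ^ 12 - (x + 1) := by omega
  rw [h, Nat.testBit_two_pow_sub_succ (by omega)]
  simp [hk]

-- reading bit k (k < 12) is unchanged by mod 2^12
theorem testBit_mod12 (n k : Nat) (hk : k < 12) : (n % 4096).testBit k = n.testBit k := by
  have h : (4096 : Nat) = 2 ^ 12 := by norm_num
  rw [h, Nat.testBit_mod_two_pow]
  simp [hk]

-- the Python test 'code & bit' (bit = 2^k, k < 12) reads bit k of code % 4096, also for negative code
theorem band_bit (a b : Int) (k : Nat) (hk : k < 12) (hb : b = 2 ^ k) :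
    (PySem.Int.band a b ≠ 0) = ((a % 4096).toNat.testBit k = true) := by
  subst hb
  have h2 : ((2 : Int) ^ k) = ((2 ^ k : Nat) : Int) := by push_cast; ring
  rcases le_or_gt 0 a with ha | ha
  · rw [h2, show a = ((a.toNat : Nat) : Int) by omega, PySem.Int.band_natCast]
    have hm : (((a.toNat : Nat) : Int) % 4096).toNat = a.toNat % 4096 := by omega
    rw [hm, testBit_mod12 _ _ hk, Nat.and_two_pow]
    have hp := Nat.two_pow_pos k
    cases hb : a.toNat.testBit k <;> simp
  · set N := (-a - 1).toNat with hN
    have hband : PySem.Int.band a (2 ^ k) = ((2 ^ k - (2 ^ k &&& N) : Nat) : Int) := by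
      simp only [PySem.Int.band]
      rw [if_neg (by omega), if_pos (by positivity)]
      have ht : ((2 : Int) ^ k).toNat = 2 ^ k := by rw [h2]; exact Int.toNat_natCast _
      rw [ht, ← hN]
    have hm : (a % 4096).toNat = 4095 - N % 4096 := by omega
    rw [hband, hm, testBit_compl12 _ (Nat.mod_lt _ (by norm_num)) _ hk,
        testBit_mod12 _ _ hk, Nat.and_comm, Nat.and_two_pow]
    have hp := Nat.two_pow_pos k
    cases hb : N.testBit k <;> simp

theorem A_eq (value : Int) : decode_speed_py value = aCore (value % 4096).toNat := by
  have h11 := band_bit value 2048 11 (by omega) (by norm_num)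
  have h10 := band_bit value 1024 10 (by omega) (by norm_num)
  have h9 := band_bit value 512 9 (by omega) (by norm_num)
  have h8 := band_bit value 256 8 (by omega) (by norm_num)
  have h7 := band_bit value 128 7 (by omega) (by norm_num)
  have h6 := band_bit value 64 6 (by omega) (by norm_num)
  have h5 := band_bit value 32 5 (by omega) (by norm_num)
  have h4 := band_bit value 16 4 (by omega) (by norm_num)
  have h3 := band_bit value 8 3 (by omega) (by norm_num)
  have h2 := band_bit value 4 2 (by omega) (by norm_num)
  have h1 := band_bit value 2 1 (by omega) (by norm_num)
  have h0 := band_bit value 1 0 (by omega) (by norm_num)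
  simp only [decode_speed_py, SPEED_PRIORITY, scanSpeed, aCore]
  by_cases hb11 : (value % 4096).toNat.testBit 11 = true
  · rw [if_pos (h11 ▸ hb11), if_pos hb11]
  · rw [if_neg (h11 ▸ hb11), if_neg hb11]
    by_cases hb10 : (value % 4096).toNat.testBit 10 = true
    · rw [if_pos (h10 ▸ hb10), if_pos hb10]
    · rw [if_neg (h10 ▸ hb10), if_neg hb10]
      by_cases hb9 : (value % 4096).toNat.testBit 9 = true
      · rw [if_pos (h9 ▸ hb9), if_pos hb9]
      · rw [if_neg (h9 ▸ hb9), if_neg hb9]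
        by_cases hb8 : (value % 4096).toNat.testBit 8 = true
        · rw [if_pos (h8 ▸ hb8), if_pos hb8]
        · rw [if_neg (h8 ▸ hb8), if_neg hb8]
          by_cases hb7 : (value % 4096).toNat.testBit 7 = true
          · rw [if_pos (h7 ▸ hb7), if_pos hb7]
          · rw [if_neg (h7 ▸ hb7), if_neg hb7]
            by_cases hb6 : (value % 4096).toNat.testBit 6 = true
            · rw [if_pos (h6 ▸ hb6), if_pos hb6]
            · rw [if_neg (h6 ▸ hb6), if_neg hb6]
              by_cases hb5 : (value % 4096).toNat.testBit 5 = true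
              · rw [if_pos (h5 ▸ hb5), if_pos hb5]
              · rw [if_neg (h5 ▸ hb5), if_neg hb5]
                by_cases hb4 : (value % 4096).toNat.testBit 4 = true
                · rw [if_pos (h4 ▸ hb4), if_pos hb4]
                · rw [if_neg (h4 ▸ hb4), if_neg hb4]
                  by_cases hb3 : (value % 4096).toNat.testBit 3 = true
                  · rw [if_pos (h3 ▸ hb3), if_pos hb3]
                  · rw [if_neg (h3 ▸ hb3), if_neg hb3]
                    by_cases hb2 : (value % 4096).toNat.testBit 2 = true
                    · rw [if_pos (h2 ▸ hb2), if_pos hb2]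
                    · rw [if_neg (h2 ▸ hb2), if_neg hb2]
                      by_cases hb1 : (value % 4096).toNat.testBit 1 = true
                      · rw [if_pos (h1 ▸ hb1), if_pos hb1]
                      · rw [if_neg (h1 ▸ hb1), if_neg hb1]
                        by_cases hb0 : (value % 4096).toNat.testBit 0 = true
                        · rw [if_pos (h0 ▸ hb0), if_pos hb0]
                        · rw [if_neg (h0 ▸ hb0), if_neg hb0]

theorem B_eq (value : Int) : decode_speed_py_alt value = bCore (value % 4096).toNat := by
  have hmod : PySem.Int.mod value 4096 = value % 4096 :=
    PySem.Int.mod_eq_emod_of_pos (by norm_num)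
  obtain ⟨n, hn⟩ : ∃ n : Nat, value % 4096 = (n : Int) := ⟨(value % 4096).toNat, by omega⟩
  simp only [decode_speed_py_alt, bCore, hmod, hn, Int.toNat_natCast, Nat.cast_eq_zero]

def coreChk : Bool := (List.range 4096).all fun r => aCore r == bCore r

set_option maxRecDepth 40000 in
theorem coreChk_true : coreChk = true := by decide

theorem core_eq : ∀ r < 4096, aCore r = bCore r := by
  intro r hr
  have h := List.all_eq_true.mp coreChk_true r (List.mem_range.mpr hr)
  simpa using h

-- ===== VERDICT (by name: the statement is the Claim_ definition above) =====
theorem decode_speed_py_spec : Claim_equal_decode_speed_py := by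
  intro value _
  unfold Spec_decode_speed_py
  rw [A_eq, B_eq]
  exact core_eq _ (by omega)
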